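-- pv_equiv track=rewrite | github.com/owokit/serverless-kb-mcp | ocr-service/ocr-pipeline/src/serverless_mcp/status/mapping.py | map_embedding_status
-- ===== SOURCE A (Python) =====
-- from typing import Any
--
-- def map_embedding_status(embed_status: str, profile_rows: list[dict[str, Any]]) -> str:
--     """
--     EN: Map embedding status from profile rows or legacy embed_status field.
--     CN: 从 profile 行或旧版 embed_status 字段映射 embedding 状态。
--     """
--     if profile_rows:
--         if any(row.get("status") == "FAILED" for row in profile_rows):
--             return "FAILED"
--         if all(row.get("status") == "INDEXED" for row in profile_rows):
--             return "DONE"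
--         if any(row.get("status") == "EMBEDDING" for row in profile_rows):
--             return "EMBEDDING"
--         return "PENDING"
--     if embed_status == "INDEXED":
--         return "DONE"
--     if embed_status == "EMBEDDING":
--         return "EMBEDDING"
--     if embed_status == "FAILED":
--         return "FAILED"
--     return "PENDING"
-- ===== SOURCE B (Python) =====
-- # Single-pass severity lattice: each status gets a rank (INDEXED=0 < other=1 <
-- # EMBEDDING=2 < FAILED=3); the answer is a table lookup at the max rank seen.
-- _RANK = {"INDEXED": 0, "EMBEDDING": 2, "FAILED": 3}
-- _TABLE = ("DONE", "PENDING", "EMBEDDING", "FAILED")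
--
-- def map_embedding_status(embed_status, profile_rows):
--     if profile_rows:
--         m = max(_RANK.get(row.get("status"), 1) for row in profile_rows)
--     else:
--         m = _RANK.get(embed_status, 1)
--     return _TABLE[m]
-- ===== Notes on version B (the rewrite author's own statement) =====
-- stated objective: alternative
-- what changed: B replaces A's three separate priority scans (any FAILED / all INDEXED / any EMBEDDING) and the legacy if-chain with a severity lattice: each status maps to a numeric rank (INDEXED=0 < other=1 < EMBEDDING=2 < FAILED=3), one pass takes the max rank, and the answer is a table lookup at that rank (the legacy field goes through the same rank/table).
import Mathlib
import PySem

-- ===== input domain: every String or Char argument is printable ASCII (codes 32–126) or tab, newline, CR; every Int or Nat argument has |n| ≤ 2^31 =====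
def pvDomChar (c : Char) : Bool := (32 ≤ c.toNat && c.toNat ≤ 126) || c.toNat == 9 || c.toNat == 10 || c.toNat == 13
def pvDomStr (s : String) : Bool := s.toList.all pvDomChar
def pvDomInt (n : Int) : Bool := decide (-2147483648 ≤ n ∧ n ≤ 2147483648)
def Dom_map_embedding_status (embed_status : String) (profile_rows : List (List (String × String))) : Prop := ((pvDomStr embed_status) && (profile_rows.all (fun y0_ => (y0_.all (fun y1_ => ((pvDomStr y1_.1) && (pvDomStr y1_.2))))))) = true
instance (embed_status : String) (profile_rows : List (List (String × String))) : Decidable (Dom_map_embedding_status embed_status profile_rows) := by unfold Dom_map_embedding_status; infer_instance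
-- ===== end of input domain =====

-- B replaces A's three priority scans and the legacy if-chain with a single pass taking
-- the maximum of a numeric severity rank per row, then a table lookup (objective: alternative).

-- ===== PORT A =====
def map_embedding_status (embed_status : String) (profile_rows : List (List (String × String))) : String :=
  if profile_rows ≠ [] then
    if profile_rows.any (fun row => (PySem.Dict.mk row).get? "status" == some "FAILED") then "FAILED"
    else if profile_rows.all (fun row => (PySem.Dict.mk row).get? "status" == some "INDEXED") then "DONE"
    else if profile_rows.any (fun row => (PySem.Dict.mk row).get? "status" == some "EMBEDDING") then "EMBEDDING"
    else "PENDING"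
  else if embed_status == "INDEXED" then "DONE"
  else if embed_status == "EMBEDDING" then "EMBEDDING"
  else if embed_status == "FAILED" then "FAILED"
  else "PENDING"

-- ===== PORT B =====
def pvRank : PySem.Dict String Nat := PySem.Dict.mk [("INDEXED", 0), ("EMBEDDING", 2), ("FAILED", 3)]
def pvTable : List String := ["DONE", "PENDING", "EMBEDDING", "FAILED"]

-- _RANK.get(row.get("status"), 1): row.get may return None, which is in no dict keyed by str
def pvRowRank (row : List (String × String)) : Nat :=
  match (PySem.Dict.mk row).get? "status" with
  | some s => pvRank.getD s 1
  | none => 1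

def map_embedding_status_alt (embed_status : String) (profile_rows : List (List (String × String))) : String :=
  let m : Nat :=
    match profile_rows with
    | [] => pvRank.getD embed_status 1
    | r :: rs => rs.foldl (fun acc row => Nat.max acc (pvRowRank row)) (pvRowRank r)
  (PySem.List.pyGet? pvTable (Int.ofNat m)).getD ""

-- ===== PRECONDITION & SPEC =====
def Spec_map_embedding_status (embed_status : String) (profile_rows : List (List (String × String))) (out : String) : Prop := out = map_embedding_status_alt embed_status profile_rows
instance (embed_status : String) (profile_rows : List (List (String × String))) (out : String) : Decidable (Spec_map_embedding_status embed_status profile_rows out) := by unfold Spec_map_embedding_status; infer_instance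

-- ===== CLAIM (what is proved, stated in full; the proofs are below) =====
def Claim_equal_map_embedding_status : Prop := ∀ (embed_status : String) (profile_rows : List (List (String × String))), Dom_map_embedding_status embed_status profile_rows → Spec_map_embedding_status embed_status profile_rows (map_embedding_status embed_status profile_rows)

-- ===== LEMMAS AND PROOFS =====

-- the rank of a row as an if-chain over its status
theorem pvRowRank_eq (row : List (String × String)) :
    pvRowRank row =
      if (PySem.Dict.mk row).get? "status" = some "FAILED" then 3
      else if (PySem.Dict.mk row).get? "status" = some "INDEXED" then 0
      else if (PySem.Dict.mk row).get? "status" = some "EMBEDDING" then 2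
      else 1 := by
  unfold pvRowRank
  cases h : (PySem.Dict.mk row).get? "status" with
  | none => simp
  | some s =>
    by_cases h1 : s = "INDEXED"
    · simp [h1, pvRank, PySem.Dict.getD_eq_get?_getD, PySem.Dict.get?_mk_cons]
    by_cases h2 : s = "EMBEDDING"
    · simp [h2, pvRank, PySem.Dict.getD_eq_get?_getD, PySem.Dict.get?_mk_cons]
    by_cases h3 : s = "FAILED"
    · simp [h3, pvRank, PySem.Dict.getD_eq_get?_getD, PySem.Dict.get?_mk_cons]
    · simp [pvRank, PySem.Dict.getD_eq_get?_getD, h1, h2, h3,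
        Ne.symm h1, Ne.symm h2, Ne.symm h3, PySem.Dict.get?]

theorem fmax_le {α : Type} (f : α → Nat) (l : List α) (a b : Nat)
    (ha : a ≤ b) (h : ∀ x ∈ l, f x ≤ b) :
    l.foldl (fun acc x => Nat.max acc (f x)) a ≤ b := by
  induction l generalizing a with
  | nil => exact ha
  | cons y ys ih =>
    exact ih _ (Nat.max_le.mpr ⟨ha, h y (by simp)⟩) (fun x hx => h x (by simp [hx]))

theorem le_fmax_init {α : Type} (f : α → Nat) (l : List α) (a : Nat) :
    a ≤ l.foldl (fun acc x => Nat.max acc (f x)) a := by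
  induction l generalizing a with
  | nil => exact le_refl a
  | cons y ys ih => exact le_trans (Nat.le_max_left a (f y)) (ih _)

theorem le_fmax_mem {α : Type} (f : α → Nat) (l : List α) (a : Nat) (x : α) (hx : x ∈ l) :
    f x ≤ l.foldl (fun acc x => Nat.max acc (f x)) a := by
  induction l generalizing a with
  | nil => cases hx
  | cons y ys ih =>
    rcases List.mem_cons.mp hx with h | h
    · subst h; exact le_trans (Nat.le_max_right a (f x)) (le_fmax_init f ys _)
    · exact ih _ h

-- ===== VERDICT (by name: the statement is the Claim_ definition above) =====
theorem map_embedding_status_spec : Claim_equal_map_embedding_status := by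
  intro embed_status profile_rows _
  unfold Spec_map_embedding_status map_embedding_status map_embedding_status_alt
  rcases profile_rows with _ | ⟨r, rs⟩
  · simp only [ne_eq, not_true_eq_false, if_false]
    by_cases h1 : embed_status = "INDEXED"
    · simp [h1, pvRank, pvTable, PySem.Dict.getD_eq_get?_getD, PySem.Dict.get?_mk_cons,
        PySem.List.pyGet?, PySem.List.pyIdx?]
    by_cases h2 : embed_status = "EMBEDDING"
    · simp [h2, pvRank, pvTable, PySem.Dict.getD_eq_get?_getD, PySem.Dict.get?_mk_cons,
        PySem.List.pyGet?, PySem.List.pyIdx?]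
    by_cases h3 : embed_status = "FAILED"
    · simp [h3, pvRank, pvTable, PySem.Dict.getD_eq_get?_getD, PySem.Dict.get?_mk_cons,
        PySem.List.pyGet?, PySem.List.pyIdx?]
    · simp [pvRank, pvTable, PySem.Dict.getD_eq_get?_getD, h1, h2, h3,
        Ne.symm h1, Ne.symm h2, Ne.symm h3, PySem.Dict.get?,
        PySem.List.pyGet?, PySem.List.pyIdx?]
  · have hne : r :: rs ≠ [] := by simp
    simp only [hne, ne_eq, not_false_eq_true, if_true]
    set m : Nat := rs.foldl (fun acc row => Nat.max acc (pvRowRank row)) (pvRowRank r) with hm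
    have hle : ∀ row ∈ r :: rs, pvRowRank row ≤ m := by
      intro row hrow
      rcases List.mem_cons.mp hrow with h | h
      · subst h; exact le_fmax_init _ _ _
      · exact le_fmax_mem _ _ _ _ h
    have hub : ∀ b, (∀ row ∈ r :: rs, pvRowRank row ≤ b) → m ≤ b := by
      intro b hb
      exact fmax_le _ _ _ _ (hb r (by simp)) (fun x hx => hb x (by simp [hx]))
    by_cases hF : ∃ row ∈ r :: rs, (PySem.Dict.mk row).get? "status" = some "FAILED"
    · obtain ⟨row, hrow, hfail⟩ := hF
      have h3 : m = 3 := by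
        have hlo : 3 ≤ m := by
          have := hle row hrow
          rw [pvRowRank_eq, hfail] at this
          simpa using this
        have hhi : m ≤ 3 := hub 3 (by
          intro row' _; rw [pvRowRank_eq]; split_ifs <;> omega)
        omega
      have hA : (r :: rs).any (fun row => (PySem.Dict.mk row).get? "status" == some "FAILED") = true := by
        simp only [List.any_eq_true, beq_iff_eq]; exact ⟨row, hrow, hfail⟩
      simp [hA, h3, pvTable, PySem.List.pyGet?, PySem.List.pyIdx?]
    · push_neg at hF
      have hanyF : (r :: rs).any (fun row => (PySem.Dict.mk row).get? "status" == some "FAILED") = false := by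
        simp only [List.any_eq_false, beq_iff_eq]; exact fun row h => hF row h
      by_cases hI : ∀ row ∈ r :: rs, (PySem.Dict.mk row).get? "status" = some "INDEXED"
      · have h0 : m = 0 := Nat.le_zero.mp (hub 0 (by
          intro row hrow; rw [pvRowRank_eq, hI row hrow]; simp))
        have hallI : (r :: rs).all (fun row => (PySem.Dict.mk row).get? "status" == some "INDEXED") = true := by
          simp only [List.all_eq_true, beq_iff_eq]; exact hI
        simp [hanyF, hallI, h0, pvTable, PySem.List.pyGet?, PySem.List.pyIdx?]
      · have hallI : (r :: rs).all (fun row => (PySem.Dict.mk row).get? "status" == some "INDEXED") = false := by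
          simp only [List.all_eq_false, beq_iff_eq]
          push_neg at hI; obtain ⟨row, hrow, h⟩ := hI; exact ⟨row, hrow, h⟩
        by_cases hE : ∃ row ∈ r :: rs, (PySem.Dict.mk row).get? "status" = some "EMBEDDING"
        · obtain ⟨row, hrow, hemb⟩ := hE
          have h2 : m = 2 := by
            have hlo : 2 ≤ m := by
              have := hle row hrow
              rw [pvRowRank_eq, hemb] at this
              have hf : ¬ (some "EMBEDDING" = some ("FAILED" : String)) := by decide
              have hi : ¬ (some "EMBEDDING" = some ("INDEXED" : String)) := by decide
              rw [if_neg hf, if_neg hi, if_pos rfl] at this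
              exact this
            have hhi : m ≤ 2 := hub 2 (by
              intro row' hrow'; rw [pvRowRank_eq]
              have hf := hF row' hrow'
              split_ifs with a _ _ <;> first | exact absurd a hf | omega)
            omega
          have hanyE : (r :: rs).any (fun row => (PySem.Dict.mk row).get? "status" == some "EMBEDDING") = true := by
            simp only [List.any_eq_true, beq_iff_eq]; exact ⟨row, hrow, hemb⟩
          simp [hanyF, hallI, hanyE, h2, pvTable, PySem.List.pyGet?, PySem.List.pyIdx?]
        · push_neg at hE
          have h1 : m = 1 := by
            have hhi : m ≤ 1 := hub 1 (by
              intro row' hrow'; rw [pvRowRank_eq]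
              have hf := hF row' hrow'
              have he := hE row' hrow'
              split_ifs with hva hvb hvc <;> first | exact absurd hva hf | exact absurd hvc he | omega)
            have hlo : 1 ≤ m := by
              push_neg at hI; obtain ⟨row, hrow, hni⟩ := hI
              have := hle row hrow
              rw [pvRowRank_eq] at this
              rw [if_neg (hF row hrow), if_neg hni, if_neg (hE row hrow)] at this
              omega
            omega
          have hanyE : (r :: rs).any (fun row => (PySem.Dict.mk row).get? "status" == some "EMBEDDING") = false := by
            simp only [List.any_eq_false, beq_iff_eq]; exact fun row h => hE row h
          simp [hanyF, hallI, hanyE, h1, pvTable, PySem.List.pyGet?, PySem.List.pyIdx?]
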